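-- pv_equiv track=rewrite | github.com/amitthombare01/edupredict | backend/src/analysis.py | _find_target_column
-- ===== SOURCE A (Python) =====
-- from typing import Any, Dict, List, Optional, Tuple
--
-- TARGET_PRIORITIES = [
--     "pass",
--     "final_exam_score",
--     "final_score",
--     "grade",
--     "score",
--     "result",
-- ]
--
-- def normalize_column_name(name: str) -> str:
--     return "".join(ch for ch in name.lower() if ch.isalnum())
--
-- def _find_target_column(columns: List[str]) -> Optional[str]:
--     normalized = {normalize_column_name(col): col for col in columns}
--     for candidate in TARGET_PRIORITIES:
--         normalized_candidate = normalize_column_name(candidate)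
--         if normalized_candidate in normalized:
--             return normalized[normalized_candidate]
--
--     numeric_columns = [col for col in columns if col.lower().startswith("final")]
--     if numeric_columns:
--         return numeric_columns[-1]
--
--     return None
-- ===== SOURCE B (Python) =====
-- from typing import List, Optional
--
-- TARGET_PRIORITIES = [
--     "pass",
--     "final_exam_score",
--     "final_score",
--     "grade",
--     "score",
--     "result",
-- ]
--
-- def normalize_column_name(name: str) -> str:
--     return "".join(ch for ch in name.lower() if ch.isalnum())
--
-- _RANK = {normalize_column_name(c): i for i, c in enumerate(TARGET_PRIORITIES)}
--
-- def _find_target_column(columns: List[str]) -> Optional[str]: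
--     best = None
--     best_rank = len(TARGET_PRIORITIES)
--     fallback = None
--     for col in columns:
--         r = _RANK.get(normalize_column_name(col))
--         if r is not None and r <= best_rank:
--             best = col
--             best_rank = r
--         if col.lower().startswith("final"):
--             fallback = col
--     return best if best is not None else fallback
-- ===== Notes on version B (the rewrite author's own statement) =====
-- stated objective: alternative
-- what changed: Replaces the build-a-dict-then-scan-priorities-then-rescan-for-fallback structure by a precomputed rank table and a single pass over columns tracking the best (lowest-rank, last-wins) column and the last 'final'-prefixed fallback.
import Mathlib
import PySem

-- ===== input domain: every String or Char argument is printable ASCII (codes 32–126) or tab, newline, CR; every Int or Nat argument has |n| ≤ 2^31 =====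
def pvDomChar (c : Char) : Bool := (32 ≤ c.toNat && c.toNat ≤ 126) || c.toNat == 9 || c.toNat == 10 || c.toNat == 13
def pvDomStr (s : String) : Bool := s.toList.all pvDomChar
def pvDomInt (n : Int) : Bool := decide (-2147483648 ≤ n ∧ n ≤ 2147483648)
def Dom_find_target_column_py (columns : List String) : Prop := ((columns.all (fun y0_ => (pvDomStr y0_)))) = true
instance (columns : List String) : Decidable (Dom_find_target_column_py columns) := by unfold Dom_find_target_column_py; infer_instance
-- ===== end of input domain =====

-- B replaces A's dict-then-priority-scan-then-rescan by a rank table and one pass over columns (alternative decomposition; return value only, no mutation involved).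

-- ===== PORT A =====
def pvTargets : List String := ["pass", "final_exam_score", "final_score", "grade", "score", "result"]

def pvNorm (name : String) : String :=
  String.ofList ((PySem.Chars.lower name.toList).filter (fun ch => PySem.Chars.isalnum ch))

def pvDictA (columns : List String) : PySem.Dict String String :=
  columns.foldl (fun d col => d.insert (pvNorm col) col) PySem.Dict.empty

def pvLoopA (d : PySem.Dict String String) : List String → Option String
  | [] => none
  | c :: rest =>
    let nc := pvNorm c
    if d.contains nc then d.get? nc else pvLoopA d rest

def find_target_column_py (columns : List String) : Option String :=
  let normalized := pvDictA columns
  match pvLoopA normalized pvTargets with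
  | some v => some v
  | none =>
    let numeric := columns.filter (fun col => PySem.Str.startswith (PySem.Str.lower col) "final")
    if numeric.isEmpty then none else PySem.List.pyGet? numeric (-1)

-- ===== PORT B =====
def pvRank : PySem.Dict String Int :=
  PySem.Dict.ofList ((PySem.List.enumerate pvTargets).map (fun p => (pvNorm p.2, p.1)))

def pvStepB (s : Option String × Int × Option String) (col : String) :
    Option String × Int × Option String :=
  let best := s.1
  let bestRank := s.2.1
  let fallback := s.2.2
  let r := pvRank.get? (pvNorm col)
  let bb : Option String × Int :=
    match r with
    | some rv => if rv ≤ bestRank then (some col, rv) else (best, bestRank)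
    | none => (best, bestRank)
  let fallback' := if PySem.Str.startswith (PySem.Str.lower col) "final" then some col else fallback
  (bb.1, bb.2, fallback')

def find_target_column_py_alt (columns : List String) : Option String :=
  let s := columns.foldl pvStepB (none, (6 : Int), none)
  match s.1 with
  | some v => some v
  | none => s.2.2

-- ===== PRECONDITION & SPEC =====
def Spec_find_target_column_py (columns : List String) (out : Option String) : Prop := out = find_target_column_py_alt columns
instance (columns : List String) (out : Option String) : Decidable (Spec_find_target_column_py columns out) := by unfold Spec_find_target_column_py; infer_instance

-- ===== CLAIM (what is proved, stated in full; the proofs are below) =====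
def Claim_equal_find_target_column_py : Prop := ∀ (columns : List String), Dom_find_target_column_py columns → Spec_find_target_column_py columns (find_target_column_py columns)


-- ===== LEMMAS AND PROOFS =====

def pvL (k : String) (xs : List String) : Option String := (pvDictA xs).get? k

def pvCond (c : String) : Bool := PySem.Chars.startswith (PySem.Chars.lower c.toList) ['f', 'i', 'n', 'a', 'l']

def pvFb (xs : List String) : Option String := (xs.filter pvCond).getLast?

def pvChain (xs : List String) : Option String :=
  ((((((pvL "pass" xs).or (pvL "finalexamscore" xs)).or (pvL "finalscore" xs)).or
      (pvL "grade" xs)).or (pvL "score" xs)).or (pvL "result" xs))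

def pvMr (xs : List String) : Int :=
  if (pvL "pass" xs).isSome then 0
  else if (pvL "finalexamscore" xs).isSome then 1
  else if (pvL "finalscore" xs).isSome then 2
  else if (pvL "grade" xs).isSome then 3
  else if (pvL "score" xs).isSome then 4
  else if (pvL "result" xs).isSome then 5
  else 6

lemma pvL_snoc (k : String) (xs : List String) (x : String) :
    pvL k (xs ++ [x]) = if pvNorm x = k then some x else pvL k xs := by
  have hd : pvDictA (xs ++ [x]) = (pvDictA xs).insert (pvNorm x) x := by
    simp [pvDictA, List.foldl_append]
  simp only [pvL, hd, PySem.Dict.get?_insert]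
  by_cases h : pvNorm x = k
  · simp [h]
  · rw [if_neg h, if_neg (fun hk => h hk.symm)]

lemma pvFb_snoc (xs : List String) (x : String) :
    pvFb (xs ++ [x]) = if pvCond x then some x else pvFb xs := by
  simp only [pvFb, List.filter_append]
  by_cases h : pvCond x <;> simp [h]

lemma pvRank_eq : pvRank = PySem.Dict.mk [("pass", 0), ("finalexamscore", 1), ("finalscore", 2),
    ("grade", 3), ("score", 4), ("result", 5)] := by decide

lemma pvRank_get (s : String) : pvRank.get? s =
    if s = "pass" then some 0
    else if s = "finalexamscore" then some 1
    else if s = "finalscore" then some 2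
    else if s = "grade" then some 3
    else if s = "score" then some 4
    else if s = "result" then some 5
    else none := by
  rw [pvRank_eq]
  simp only [PySem.Dict.get?_mk_cons, beq_iff_eq]
  by_cases h0 : s = "pass" <;> by_cases h1 : s = "finalexamscore" <;>
    by_cases h2 : s = "finalscore" <;> by_cases h3 : s = "grade" <;>
    by_cases h4 : s = "score" <;> by_cases h5 : s = "result" <;>
    simp_all [eq_comm, PySem.Dict.get?]

lemma pvFoldB (xs : List String) :
    xs.foldl pvStepB (none, (6 : Int), none) = (pvChain xs, pvMr xs, pvFb xs) := by
  induction xs using List.reverseRecOn with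
  | nil => decide
  | append_singleton xs x ih =>
    rw [List.foldl_append, List.foldl_cons, List.foldl_nil, ih]
    simp only [pvChain, pvMr, pvL_snoc, pvFb_snoc, pvStepB, pvRank_get, pvCond]
    by_cases h0 : pvNorm x = "pass" <;> by_cases h1 : pvNorm x = "finalexamscore" <;>
      by_cases h2 : pvNorm x = "finalscore" <;> by_cases h3 : pvNorm x = "grade" <;>
      by_cases h4 : pvNorm x = "score" <;> by_cases h5 : pvNorm x = "result" <;>
      simp_all <;>
      rcases hL0 : pvL "pass" xs with _ | v0 <;>
      rcases hL1 : pvL "finalexamscore" xs with _ | v1 <;>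
      rcases hL2 : pvL "finalscore" xs with _ | v2 <;>
      rcases hL3 : pvL "grade" xs with _ | v3 <;>
      rcases hL4 : pvL "score" xs with _ | v4 <;>
      rcases hL5 : pvL "result" xs with _ | v5 <;>
      simp_all

lemma pvNorm_pass : pvNorm "pass" = "pass" := by decide
lemma pvNorm_fes : pvNorm "final_exam_score" = "finalexamscore" := by decide
lemma pvNorm_fs : pvNorm "final_score" = "finalscore" := by decide
lemma pvNorm_grade : pvNorm "grade" = "grade" := by decide
lemma pvNorm_score : pvNorm "score" = "score" := by decide
lemma pvNorm_result : pvNorm "result" = "result" := by decide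

lemma pvContains_eq (d : PySem.Dict String String) (k : String) :
    d.contains k = (d.get? k).isSome := by
  rcases h : d.get? k with _ | v
  · rw [PySem.Dict.get?_eq_none_iff_contains] at h
    simp [h]
  · have : ¬ d.get? k = none := by simp [h]
    rw [PySem.Dict.get?_eq_none_iff_contains] at this
    simp at this
    simp [this]

lemma pvLastIf {α : Type} (l : List α) :
    (if l.isEmpty then none else PySem.List.pyGet? l (-1)) = l.getLast? := by
  rcases l with _ | ⟨a, t⟩
  · simp
  · simp [PySem.List.pyGet?_neg_one]

lemma pvA_eq (xs : List String) :
    find_target_column_py xs =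
      match pvChain xs with
      | some v => some v
      | none => pvFb xs := by
  rw [find_target_column_py]
  simp only [pvLoopA, pvTargets, pvNorm_pass, pvNorm_fes, pvNorm_fs, pvNorm_grade,
    pvNorm_score, pvNorm_result, pvContains_eq, pvLastIf]
  rcases hL0 : pvL "pass" xs with _ | v0 <;>
    rcases hL1 : pvL "finalexamscore" xs with _ | v1 <;>
    rcases hL2 : pvL "finalscore" xs with _ | v2 <;>
    rcases hL3 : pvL "grade" xs with _ | v3 <;>
    rcases hL4 : pvL "score" xs with _ | v4 <;>
    rcases hL5 : pvL "result" xs with _ | v5 <;>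
    simp_all [pvL, pvChain, pvFb]
  rfl

lemma pvB_eq (xs : List String) :
    find_target_column_py_alt xs =
      match pvChain xs with
      | some v => some v
      | none => pvFb xs := by
  rw [find_target_column_py_alt, pvFoldB]


-- ===== VERDICT (by name: the statement is the Claim_ definition above) =====
theorem find_target_column_py_spec : Claim_equal_find_target_column_py := by
  intro columns _
  show _ = _
  rw [pvA_eq, pvB_eq]
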